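-- pv_equiv track=rewrite | github.com/EdvinasKilbauskas/Coventry-Uni-210CT-Coursework | Advanced 05.py | Big_O
-- ===== SOURCE A (Python) =====
-- def Big_O(m1, k1, m2, k2):
-- 	n = 0
-- 	# continues looping until the state changes
-- 	while True:
-- 		# calculates differences between equations at each N value
-- 		dif1 = (m1 * n + k1) - (m2 * n + k2)
-- 		n += 1
-- 		dif2 = (m1 * n + k1) - (m2 * n + k2)
--
-- 		# if sing of difference before incrementing N is different than after,
-- 		# that means the run-time of the two algorithms swiched and we break out of the loop
-- 		if dif1 <= 0 and dif2 > 0 or \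
-- 			dif1 >= 0 and dif2 < 0:
-- 			break
--
-- 		# limit number of iterations to prevent infinite loops in case there's no run-time switch for the given equations
-- 		if n > 1000:
-- 			return -1
--
-- 	return n
-- ===== SOURCE B (Python) =====
-- def Big_O(m1, k1, m2, k2):
--     # Closed form: dif(n) = a*n + b with a = m1-m2, b = k1-k2; find the sign switch directly.
--     a = m1 - m2
--     b = k1 - k2
--     if a > 0 and b <= 0:
--         n = (-b) // a + 1
--         return n if n <= 1001 else -1
--     if a < 0 and b >= 0:
--         n = b // (-a) + 1
--         return n if n <= 1001 else -1
--     return -1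
-- ===== Notes on version B (the rewrite author's own statement) =====
-- stated objective: faster
-- what changed: Replaced A's iterative scan of up to 1001 candidate n values with a closed-form computation of the sign-switch index via one floor division, with case analysis on the sign of the slope m1-m2.
import Mathlib
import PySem

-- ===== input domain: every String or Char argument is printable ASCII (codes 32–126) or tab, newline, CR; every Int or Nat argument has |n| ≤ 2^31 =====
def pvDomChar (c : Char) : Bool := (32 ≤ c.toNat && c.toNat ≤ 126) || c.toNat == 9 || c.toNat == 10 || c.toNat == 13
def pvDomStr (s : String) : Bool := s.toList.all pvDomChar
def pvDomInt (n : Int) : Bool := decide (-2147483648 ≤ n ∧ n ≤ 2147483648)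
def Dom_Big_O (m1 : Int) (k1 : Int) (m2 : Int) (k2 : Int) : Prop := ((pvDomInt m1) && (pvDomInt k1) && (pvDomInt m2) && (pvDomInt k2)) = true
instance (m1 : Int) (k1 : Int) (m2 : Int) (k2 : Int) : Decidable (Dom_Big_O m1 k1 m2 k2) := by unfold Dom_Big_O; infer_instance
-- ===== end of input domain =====

-- B replaces A's bounded scan for the sign switch of dif(n) = (m1-m2)*n + (k1-k2)
-- by a closed-form floor division with a case analysis on the slope sign (objective: faster, constant time).

-- ===== PORT A =====
-- A's `while True` loop: state is n; each iteration computes dif1 at n, increments n,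
-- computes dif2 at n, breaks (returning n) on a sign switch, returns -1 once n > 1000.
-- fuel = 1002 is enough: the loop runs at most 1001 iterations before `n > 1000` returns.
def Big_O_loop (m1 k1 m2 k2 : Int) (n : Int) (fuel : Nat) : Int :=
  match fuel with
  | 0 => -1
  | fuel + 1 =>
    if ((m1 * n + k1) - (m2 * n + k2) ≤ 0 ∧ (m1 * (n+1) + k1) - (m2 * (n+1) + k2) > 0) ∨
       ((m1 * n + k1) - (m2 * n + k2) ≥ 0 ∧ (m1 * (n+1) + k1) - (m2 * (n+1) + k2) < 0) then
      n + 1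
    else if n + 1 > 1000 then -1
    else Big_O_loop m1 k1 m2 k2 (n + 1) fuel

def Big_O (m1 : Int) (k1 : Int) (m2 : Int) (k2 : Int) : Int :=
  Big_O_loop m1 k1 m2 k2 0 1002

-- ===== PORT B =====
def Big_O_alt (m1 : Int) (k1 : Int) (m2 : Int) (k2 : Int) : Int :=
  let a := m1 - m2
  let b := k1 - k2
  if a > 0 ∧ b ≤ 0 then
    let n := PySem.Int.floordiv (-b) a + 1
    if n ≤ 1001 then n else -1
  else if a < 0 ∧ b ≥ 0 then
    let n := PySem.Int.floordiv b (-a) + 1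
    if n ≤ 1001 then n else -1
  else -1

-- ===== PRECONDITION & SPEC =====
def Spec_Big_O (m1 : Int) (k1 : Int) (m2 : Int) (k2 : Int) (out : Int) : Prop := out = Big_O_alt m1 k1 m2 k2
instance (m1 : Int) (k1 : Int) (m2 : Int) (k2 : Int) (out : Int) : Decidable (Spec_Big_O m1 k1 m2 k2 out) := by unfold Spec_Big_O; infer_instance

-- ===== CLAIM (what is proved, stated in full; the proofs are below) =====
def Claim_equal_Big_O : Prop := ∀ (m1 : Int) (k1 : Int) (m2 : Int) (k2 : Int), Dom_Big_O m1 k1 m2 k2 → Spec_Big_O m1 k1 m2 k2 (Big_O m1 k1 m2 k2)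

-- ===== LEMMAS AND PROOFS =====

-- The loop is symmetric in the two lines: negating dif swaps the two disjuncts of the break test.
lemma Big_O_loop_swap (m1 k1 m2 k2 : Int) : ∀ (fuel : Nat) (n : Int),
    Big_O_loop m1 k1 m2 k2 n fuel = Big_O_loop m2 k2 m1 k1 n fuel := by
  intro fuel
  induction fuel with
  | zero => intro n; simp [Big_O_loop]
  | succ f ih =>
    intro n
    simp only [Big_O_loop]
    have hc : (((m1 * n + k1) - (m2 * n + k2) ≤ 0 ∧ (m1 * (n+1) + k1) - (m2 * (n+1) + k2) > 0) ∨
       ((m1 * n + k1) - (m2 * n + k2) ≥ 0 ∧ (m1 * (n+1) + k1) - (m2 * (n+1) + k2) < 0)) ↔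
       (((m2 * n + k2) - (m1 * n + k1) ≤ 0 ∧ (m2 * (n+1) + k2) - (m1 * (n+1) + k1) > 0) ∨
       ((m2 * n + k2) - (m1 * n + k1) ≥ 0 ∧ (m2 * (n+1) + k2) - (m1 * (n+1) + k1) < 0)) := by
      constructor <;> omega
    by_cases h : ((m1 * n + k1) - (m2 * n + k2) ≤ 0 ∧ (m1 * (n+1) + k1) - (m2 * (n+1) + k2) > 0) ∨
       ((m1 * n + k1) - (m2 * n + k2) ≥ 0 ∧ (m1 * (n+1) + k1) - (m2 * (n+1) + k2) < 0)
    · rw [if_pos h, if_pos (hc.mp h)]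
    · rw [if_neg h, if_neg (fun h' => h (hc.mpr h'))]
      by_cases hn : n + 1 > 1000
      · rw [if_pos hn, if_pos hn]
      · rw [if_neg hn, if_neg hn, ih]

-- No sign switch ever happens when the difference stays on one side: a ≥ 0 ∧ b > 0.
lemma Big_O_loop_pos (m1 k1 m2 k2 : Int) (ha : m1 - m2 ≥ 0) (hb : k1 - k2 > 0) :
    ∀ (fuel : Nat) (n : Int), 0 ≤ n → 1000 - n < (fuel : Int) →
    Big_O_loop m1 k1 m2 k2 n fuel = -1 := by
  intro fuel
  induction fuel with
  | zero => intro n _ _; simp [Big_O_loop]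
  | succ f ih =>
    intro n hn hf
    simp only [Big_O_loop]
    have h1 : (m1 - m2) * n ≥ 0 := mul_nonneg ha hn
    have h2 : (m1 - m2) * (n + 1) ≥ 0 := mul_nonneg ha (by omega)
    rw [if_neg (by rintro (⟨hA, hB⟩ | ⟨hC, hD⟩) <;> nlinarith)]
    by_cases hcap : n + 1 > 1000
    · rw [if_pos hcap]
    · rw [if_neg hcap]; exact ih (n + 1) (by omega) (by omega)

-- a = 0, b ≤ 0: the difference is constant, no switch.
lemma Big_O_loop_const (m1 k1 m2 k2 : Int) (ha : m1 - m2 = 0) (hb : k1 - k2 ≤ 0) :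
    ∀ (fuel : Nat) (n : Int), 1000 - n < (fuel : Int) →
    Big_O_loop m1 k1 m2 k2 n fuel = -1 := by
  intro fuel
  induction fuel with
  | zero => intro n _; simp [Big_O_loop]
  | succ f ih =>
    intro n hf
    simp only [Big_O_loop]
    have h1 : (m1 - m2) * n = 0 := by rw [ha]; ring
    have h2 : (m1 - m2) * (n + 1) = 0 := by rw [ha]; ring
    rw [if_neg (by rintro (⟨hA, hB⟩ | ⟨hC, hD⟩) <;> nlinarith)]
    by_cases hcap : n + 1 > 1000
    · rw [if_pos hcap]
    · rw [if_neg hcap]; exact ih (n + 1) (by omega)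

-- a > 0, b ≤ 0, switch index N = (-b) // a within the cap: the loop returns N + 1.
lemma Big_O_loop_hit (m1 k1 m2 k2 N : Int) (ha : m1 - m2 > 0)
    (hN1 : (m1 - m2) * N + (k1 - k2) ≤ 0) (hN2 : (m1 - m2) * (N + 1) + (k1 - k2) > 0)
    (hcap : N ≤ 1000) :
    ∀ (fuel : Nat) (n : Int), 0 ≤ n → n ≤ N → N - n < (fuel : Int) →
    Big_O_loop m1 k1 m2 k2 n fuel = N + 1 := by
  intro fuel
  induction fuel with
  | zero => intro n _ _ h; omega
  | succ f ih =>
    intro n hn hnN hf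
    simp only [Big_O_loop]
    by_cases hend : n = N
    · subst hend
      rw [if_pos (Or.inl ⟨by nlinarith, by nlinarith⟩)]
    · -- n < N, so dif(n) ≤ 0 and dif(n+1) ≤ 0: no switch, recurse
      have hlt : n + 1 ≤ N := by omega
      have hmono : (m1 - m2) * (n + 1) ≤ (m1 - m2) * N :=
        mul_le_mul_of_nonneg_left hlt (le_of_lt ha)
      have hmono0 : (m1 - m2) * n ≤ (m1 - m2) * N :=
        mul_le_mul_of_nonneg_left (by omega) (le_of_lt ha)
      rw [if_neg (by rintro (⟨hA, hB⟩ | ⟨hC, hD⟩) <;> nlinarith)]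
      rw [if_neg (by omega)]
      exact ih (n + 1) (by omega) hlt (by omega)

-- a > 0, b ≤ 0 but the switch index N is beyond the cap: the loop returns -1.
lemma Big_O_loop_miss (m1 k1 m2 k2 N : Int) (ha : m1 - m2 > 0)
    (hN1 : (m1 - m2) * N + (k1 - k2) ≤ 0) (hcap : N ≥ 1001) :
    ∀ (fuel : Nat) (n : Int), 0 ≤ n → n ≤ 1000 → 1000 - n < (fuel : Int) →
    Big_O_loop m1 k1 m2 k2 n fuel = -1 := by
  intro fuel
  induction fuel with
  | zero => intro n _ _ h; omega
  | succ f ih =>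
    intro n hn hnc hf
    simp only [Big_O_loop]
    have hlt : n + 1 ≤ N := by omega
    have hmono : (m1 - m2) * (n + 1) ≤ (m1 - m2) * N :=
      mul_le_mul_of_nonneg_left hlt (le_of_lt ha)
    have hmono0 : (m1 - m2) * n ≤ (m1 - m2) * N :=
      mul_le_mul_of_nonneg_left (by omega) (le_of_lt ha)
    rw [if_neg (by rintro (⟨hA, hB⟩ | ⟨hC, hD⟩) <;> nlinarith)]
    by_cases hcap' : n + 1 > 1000
    · rw [if_pos hcap']
    · rw [if_neg hcap']; exact ih (n + 1) (by omega) (by omega) (by omega)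

-- the floor-division bracket for N = (-b) // a, a > 0
lemma floordiv_bracket (a b : Int) (ha : 0 < a) :
    a * (PySem.Int.floordiv (-b) a) + b ≤ 0 ∧ a * (PySem.Int.floordiv (-b) a + 1) + b > 0 := by
  have h := PySem.Int.floordiv_mul_add_mod (-b) a
  have h1 := PySem.Int.mod_nonneg (-b) ha
  have h2 := PySem.Int.mod_lt (-b) ha
  constructor <;> nlinarith

-- main unconditional equivalence, a > 0 side
lemma Big_O_eq_alt_of_pos (m1 k1 m2 k2 : Int) (ha : m1 - m2 > 0) (hb : k1 - k2 ≤ 0) :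
    Big_O m1 k1 m2 k2 = Big_O_alt m1 k1 m2 k2 := by
  have hbr := floordiv_bracket (m1 - m2) (k1 - k2) ha
  set N := PySem.Int.floordiv (-(k1 - k2)) (m1 - m2) with hNdef
  have halt : Big_O_alt m1 k1 m2 k2 = if N + 1 ≤ 1001 then N + 1 else -1 := by
    simp only [Big_O_alt]
    rw [if_pos ⟨ha, hb⟩]
  rw [halt]
  by_cases hcap : N + 1 ≤ 1001
  · rw [if_pos hcap]
    exact Big_O_loop_hit m1 k1 m2 k2 N ha (by linarith [hbr.1]) (by linarith [hbr.2])
      (by omega) 1002 0 (by omega)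
      (by have : 0 ≤ N := by nlinarith [hbr.2]
          omega)
      (by omega)
  · rw [if_neg hcap]
    exact Big_O_loop_miss m1 k1 m2 k2 N ha (by linarith [hbr.1]) (by omega)
      1002 0 (by omega) (by omega) (by omega)

lemma Big_O_eq_alt (m1 k1 m2 k2 : Int) : Big_O m1 k1 m2 k2 = Big_O_alt m1 k1 m2 k2 := by
  rcases lt_trichotomy (m1 - m2) 0 with ha | ha | ha
  · -- a < 0
    by_cases hb : k1 - k2 ≥ 0
    · -- mirror of the a > 0, b ≤ 0 case, via the swap symmetry of the loop
      have hswap : Big_O m1 k1 m2 k2 = Big_O m2 k2 m1 k1 := by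
        unfold Big_O; exact Big_O_loop_swap m1 k1 m2 k2 1002 0
      rw [hswap, Big_O_eq_alt_of_pos m2 k2 m1 k1 (by omega) (by omega)]
      have e : PySem.Int.floordiv (-(k2 - k1)) (m2 - m1)
             = PySem.Int.floordiv (k1 - k2) (-(m1 - m2)) := by congr 1 <;> ring
      simp only [Big_O_alt]
      rw [if_pos (show m2 - m1 > 0 ∧ k2 - k1 ≤ 0 by omega),
          if_neg (show ¬(m1 - m2 > 0 ∧ k1 - k2 ≤ 0) by omega),
          if_pos (show m1 - m2 < 0 ∧ k1 - k2 ≥ 0 by omega), e]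
    · -- a < 0, b < 0: difference stays negative; both return -1
      have hA : Big_O m1 k1 m2 k2 = -1 := by
        unfold Big_O
        rw [Big_O_loop_swap]
        exact Big_O_loop_pos m2 k2 m1 k1 (by omega) (by omega) 1002 0 (by omega) (by omega)
      rw [hA]
      simp only [Big_O_alt]
      rw [if_neg (by omega), if_neg (by omega)]
  · -- a = 0
    have hA : Big_O m1 k1 m2 k2 = -1 := by
      by_cases hb : k1 - k2 ≤ 0
      · exact Big_O_loop_const m1 k1 m2 k2 ha hb 1002 0 (by omega)
      · exact Big_O_loop_pos m1 k1 m2 k2 (by omega) (by omega) 1002 0 (by omega) (by omega)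
    rw [hA]
    simp only [Big_O_alt]
    rw [if_neg (by omega), if_neg (by omega)]
  · -- a > 0
    by_cases hb : k1 - k2 ≤ 0
    · exact Big_O_eq_alt_of_pos m1 k1 m2 k2 ha hb
    · have hA : Big_O m1 k1 m2 k2 = -1 :=
        Big_O_loop_pos m1 k1 m2 k2 (by omega) (by omega) 1002 0 (by omega) (by omega)
      rw [hA]
      simp only [Big_O_alt]
      rw [if_neg (by omega), if_neg (by omega)]

-- ===== VERDICT (by name: the statement is the Claim_ definition above) =====
theorem Big_O_spec : Claim_equal_Big_O := by
  intro m1 k1 m2 k2 _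
  exact Big_O_eq_alt m1 k1 m2 k2
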